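-- pv_equiv track=rewrite | github.com/reallaksh19/PCF_GLB_Viewer_Conv | BM2/Port/payload/current/viewer/converters/scripts/rvm_attribute_to_xml.py | _looks_like_rev_text
-- ===== SOURCE A (Python) =====
-- def _looks_like_rev_text(text: str) -> bool:
--     lines = [line.strip() for line in text.splitlines() if line.strip()]
--     if not lines:
--         return False
--     head = set(lines[:120])
--     has_head = "HEAD" in head
--     has_modl = "MODL" in head
--     has_end = any(line.startswith("END:") for line in lines)
--     return has_head and has_modl and has_end
-- ===== SOURCE B (Python) =====
-- def _looks_like_rev_text(text: str) -> bool: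
--     # single-pass character automaton: O(1) extra state, no line list/set built
--     head = modl = end = False
--     count = 0          # non-empty (after strip) lines seen so far
--     buf = ''           # first <=4 chars of the current line after leading whitespace
--     k = 0              # chars of the current line kept after leading whitespace
--     slen = 0           # length of the current line once right-stripped
--     i, n = 0, len(text)
--     while True:
--         if i >= n or text[i] == '\n' or text[i] == '\r':
--             # end of a line: fold the line's verdicts into the flags
--             if k > 0:
--                 count += 1
--                 if count <= 120:
--                     if slen == 4 and buf == 'HEAD':
--                         head = True
--                     elif slen == 4 and buf == 'MODL':
--                         modl = True
--                 if slen >= 4 and buf == 'END:':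
--                     end = True
--                 buf, k, slen = '', 0, 0
--             if i >= n:
--                 break
--             if text[i] == '\r' and i + 1 < n and text[i + 1] == '\n':
--                 i += 2
--             else:
--                 i += 1
--         else:
--             ch = text[i]
--             if k > 0 or not (ch == ' ' or ch == '\t'):
--                 if not (ch == ' ' or ch == '\t'):
--                     slen = k + 1
--                 if k < 4:
--                     buf += ch
--                 k += 1
--             i += 1
--     return head and modl and end
-- ===== Notes on version B (the rewrite author's own statement) =====
-- stated objective: alternative
-- what changed: B replaces A's build-the-line-list / set-of-first-120 / membership-plus-any-scan pipeline by a single-pass character automaton with O(1) extra state (a <=4-char buffer, a kept-length and a stripped-length counter per line) that never materializes lines, a set or stripped strings.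
import Mathlib
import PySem

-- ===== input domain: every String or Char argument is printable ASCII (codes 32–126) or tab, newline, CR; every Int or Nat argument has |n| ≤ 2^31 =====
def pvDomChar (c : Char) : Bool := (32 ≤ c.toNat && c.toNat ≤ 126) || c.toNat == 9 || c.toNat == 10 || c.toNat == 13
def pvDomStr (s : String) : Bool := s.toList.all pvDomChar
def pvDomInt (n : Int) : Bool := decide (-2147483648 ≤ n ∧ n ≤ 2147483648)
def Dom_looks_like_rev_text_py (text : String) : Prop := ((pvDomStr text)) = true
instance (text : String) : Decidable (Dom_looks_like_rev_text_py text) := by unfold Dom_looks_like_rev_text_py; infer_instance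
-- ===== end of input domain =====

-- B is a single-pass character automaton with O(1) extra state instead of A's
-- line-list / set-of-first-120 / any-scan pipeline (objective: alternative).

-- ===== PORT A =====
def looks_like_rev_text_py (text : String) : Bool :=
  let lines := ((PySem.Str.splitlines text).map PySem.Str.strip).filter (fun l => !(l == ""))
  if lines.isEmpty then false
  else
    let head := PySem.Set.ofList (PySem.List.slice lines none (some 120))
    let has_head := PySem.Set.contains head "HEAD"
    let has_modl := PySem.Set.contains head "MODL"
    let has_end := lines.any (fun l => PySem.Str.startswith l "END:")
    has_head && has_modl && has_end

-- ===== PORT B =====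
-- automaton state: flags, non-empty-line count, and for the current line the
-- first <=4 kept chars (buf), kept length (k) and right-stripped length (slen)
structure RevSt where
  hd : Bool
  ml : Bool
  en : Bool
  cnt : Nat
  buf : List Char
  k : Nat
  slen : Nat
deriving DecidableEq, Repr

def revIsWs (c : Char) : Bool := c == ' ' || c == '\t'

def revChar (st : RevSt) (c : Char) : RevSt :=
  if st.k > 0 || !(revIsWs c) then
    { st with
      slen := if !(revIsWs c) then st.k + 1 else st.slen,
      buf := if st.k < 4 then st.buf ++ [c] else st.buf,
      k := st.k + 1 }
  else st

def revFlush (st : RevSt) : RevSt :=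
  if st.k > 0 then
    { hd := if st.cnt + 1 ≤ 120 then
              (if st.slen == 4 && st.buf == ['H','E','A','D'] then true else st.hd)
            else st.hd,
      ml := if st.cnt + 1 ≤ 120 then
              (if st.slen == 4 && st.buf == ['H','E','A','D'] then st.ml
               else if st.slen == 4 && st.buf == ['M','O','D','L'] then true else st.ml)
            else st.ml,
      en := if 4 ≤ st.slen && st.buf == ['E','N','D',':'] then true else st.en,
      cnt := st.cnt + 1, buf := [], k := 0, slen := 0 }
  else st

def revRun (st : RevSt) : List Char → RevSt
  | [] => revFlush st
  | c :: rest =>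
      if c == '\n' then revRun (revFlush st) rest
      else if c == '\r' then
        revRun (revFlush st) (if rest.head? == some '\n' then rest.tail else rest)
      else revRun (revChar st c) rest
termination_by cs => cs.length
decreasing_by all_goals simp [List.length_tail] <;> split <;> simp <;> omega

def looks_like_rev_text_py_alt (text : String) : Bool :=
  let st := revRun ⟨false, false, false, 0, [], 0, 0⟩ text.toList
  st.hd && st.ml && st.en

-- ===== PRECONDITION & SPEC =====
def Spec_looks_like_rev_text_py (text : String) (out : Bool) : Prop := out = looks_like_rev_text_py_alt text
instance (text : String) (out : Bool) : Decidable (Spec_looks_like_rev_text_py text out) := by unfold Spec_looks_like_rev_text_py; infer_instance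

-- ===== CLAIM (what is proved, stated in full; the proofs are below) =====
def Claim_equal_looks_like_rev_text_py : Prop := ∀ (text : String), Dom_looks_like_rev_text_py text → Spec_looks_like_rev_text_py text (looks_like_rev_text_py text)

-- ===== LEMMAS AND PROOFS =====

-- the line-break predicate splitlines uses, as a named function
def pvB (c : Char) : Bool :=
  decide (c.toNat = 10) || decide (c.toNat = 13) || decide (c.toNat = 11) || decide (c.toNat = 12) ||
  decide (c.toNat = 28) || decide (c.toNat = 29) || decide (c.toNat = 30) || decide (c.toNat = 133) ||
  decide (c.toNat = 8232) || decide (c.toNat = 8233)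

lemma splitlines_eq (cs : List Char) :
    PySem.Chars.splitlines cs = PySem.Chars.splitlines.go pvB cs [] [] := rfl

lemma go_nil (f : Char → Bool) (cur : List Char) (acc : List (List Char)) :
    PySem.Chars.splitlines.go f [] cur acc =
      if cur.isEmpty then acc.reverse else (cur.reverse :: acc).reverse := rfl

lemma go_crlf (f : Char → Bool) (rest cur : List Char) (acc : List (List Char)) :
    PySem.Chars.splitlines.go f ('\r'::'\n'::rest) cur acc =
      PySem.Chars.splitlines.go f rest [] (cur.reverse :: acc) := rfl

lemma go_step (f : Char → Bool) (c : Char) (rest cur : List Char) (acc : List (List Char))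
    (hc : c ≠ '\r' ∨ rest.head? ≠ some '\n') :
    PySem.Chars.splitlines.go f (c::rest) cur acc =
      if f c then PySem.Chars.splitlines.go f rest [] (cur.reverse :: acc)
      else PySem.Chars.splitlines.go f rest (c::cur) acc := by
  rw [PySem.Chars.splitlines.go.eq_def]
  split
  · rename_i heq; exact absurd heq (by simp)
  · rename_i heq
    injection heq with h1 h2
    rcases hc with h | h
    · exact absurd h1 h
    · exact absurd (by rw [h2]; rfl) h
  · rename_i heq
    injection heq with h1 h2
    subst h1; subst h2; rfl

lemma go_acc (f : Char → Bool) :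
    ∀ N cs, cs.length ≤ N → ∀ (cur : List Char) (acc : List (List Char)),
      PySem.Chars.splitlines.go f cs cur acc =
        acc.reverse ++ PySem.Chars.splitlines.go f cs cur [] := by
  intro N
  induction N with
  | zero =>
      intro cs hcs cur acc
      have hnil : cs = [] := by cases cs with | nil => rfl | cons a b => simp at hcs
      subst hnil
      rw [go_nil, go_nil]
      split <;> simp
  | succ N ih =>
      intro cs hcs cur acc
      match cs with
      | [] => rw [go_nil, go_nil]; split <;> simp
      | c :: rest =>
        by_cases hc : c = '\r' ∧ rest.head? = some '\n'
        · obtain ⟨hc1, hc2⟩ := hc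
          subst hc1
          cases rest with
          | nil => simp at hc2
          | cons d r2 =>
            have hd : d = '\n' := by simpa using hc2
            subst hd
            have hr : r2.length ≤ N := by simp at hcs; omega
            rw [go_crlf, go_crlf, ih r2 hr [] (cur.reverse :: acc), ih r2 hr [] [cur.reverse]]
            simp
        · have hc' : c ≠ '\r' ∨ rest.head? ≠ some '\n' := by tauto
          have hr : rest.length ≤ N := by simp at hcs; omega
          rw [go_step f c rest cur acc hc', go_step f c rest cur [] hc']
          split
          · rw [ih rest hr [] (cur.reverse :: acc), ih rest hr [] [cur.reverse]]; simp
          · exact ih rest hr (c :: cur) acc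

-- character-class facts on the domain
lemma char_eq_of_toNat (c d : Char) (h : c.toNat = d.toNat) : c = d := by
  apply Char.ext; apply UInt32.toBitVec_inj.mp; apply BitVec.toNat_inj.mp; exact h

lemma beq_char_toNat (c d : Char) : (c == d) = decide (c.toNat = d.toNat) := by
  by_cases h : c = d
  · subst h; simp
  · have hn : c.toNat ≠ d.toNat := fun hx => h (char_eq_of_toNat c d hx)
    simp [h, hn]

lemma pvB_eq (c : Char) (h : pvDomChar c = true) :
    pvB c = (c == '\n' || c == '\r') := by
  have hn : ((32 ≤ c.toNat ∧ c.toNat ≤ 126 ∨ c.toNat = 9) ∨ c.toNat = 10) ∨ c.toNat = 13 := by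
    simpa [pvDomChar, Bool.or_eq_true, Bool.and_eq_true, decide_eq_true_eq] using h
  rw [Bool.eq_iff_iff]
  simp only [pvB, beq_char_toNat, Bool.or_eq_true, decide_eq_true_eq,
    (show ('\n').toNat = 10 from rfl), (show ('\r').toNat = 13 from rfl)]
  omega

lemma isspace_eq_revIsWs (c : Char) (h : pvDomChar c = true) (h1 : c ≠ '\n') (h2 : c ≠ '\r') :
    PySem.Chars.isspace c = revIsWs c := by
  have hn : ((32 ≤ c.toNat ∧ c.toNat ≤ 126 ∨ c.toNat = 9) ∨ c.toNat = 10) ∨ c.toNat = 13 := by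
    simpa [pvDomChar, Bool.or_eq_true, Bool.and_eq_true, decide_eq_true_eq] using h
  have g10 : c.toNat ≠ 10 := fun hx => h1 (char_eq_of_toNat c '\n' hx)
  have g13 : c.toNat ≠ 13 := fun hx => h2 (char_eq_of_toNat c '\r' hx)
  rw [Bool.eq_iff_iff]
  simp only [PySem.Chars.isspace, revIsWs, beq_char_toNat, Bool.or_eq_true, Bool.and_eq_true,
    decide_eq_true_eq, (show (' ').toNat = 32 from rfl), (show ('\t').toNat = 9 from rfl)]
  omega

-- generic dropWhile congruence (pointwise equal predicates on the list)
lemma dropWhile_congr' (p q : Char → Bool) (l : List Char) (h : ∀ x ∈ l, p x = q x) :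
    l.dropWhile p = l.dropWhile q := by
  induction l with
  | nil => rfl
  | cons c cs ih =>
      simp only [List.dropWhile_cons, h c (by simp)]
      split
      · exact ih fun x hx => h x (by simp [hx])
      · rfl

-- rdropWhile unfolding at a cons
lemma rdropWhile_cons_nil (p : Char → Bool) (c : Char) (q : List Char)
    (hq : q.rdropWhile p = []) (hc : p c = false) : (c :: q).rdropWhile p = [c] := by
  have h1 : List.dropWhile p q.reverse = [] := by
    have := congrArg List.reverse hq
    simpa [List.rdropWhile] using this
  simp [List.rdropWhile, List.reverse_cons, List.dropWhile_append, h1, hc]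

lemma rdropWhile_cons_all (p : Char → Bool) (c : Char) (q : List Char)
    (hq : q.rdropWhile p = []) (hc : p c = true) : (c :: q).rdropWhile p = [] := by
  rw [List.rdropWhile_eq_nil_iff] at hq ⊢
  intro x hx
  rcases List.mem_cons.mp hx with h | h
  · subst h; exact hc
  · exact hq x h

lemma rdropWhile_cons_ne (p : Char → Bool) (c : Char) (q : List Char)
    (hq : q.rdropWhile p ≠ []) : (c :: q).rdropWhile p = c :: q.rdropWhile p := by
  have h1 : List.dropWhile p q.reverse ≠ [] := by
    intro h; apply hq; simp [List.rdropWhile, h]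
  simp [List.rdropWhile, List.reverse_cons, List.dropWhile_append, h1]

-- whitespace-strip as B sees it
def wstrip (p : List Char) : List Char := (p.dropWhile revIsWs).rdropWhile revIsWs

lemma strip_eq_wstrip (p : List Char) (h : ∀ c ∈ p, pvDomChar c = true ∧ c ≠ '\n' ∧ c ≠ '\r') :
    PySem.Chars.strip p = wstrip p := by
  unfold PySem.Chars.strip PySem.Chars.lstrip PySem.Chars.rstrip wstrip List.rdropWhile
  have h1 : p.dropWhile PySem.Chars.isspace = p.dropWhile revIsWs :=
    dropWhile_congr' _ _ p (fun x hx => isspace_eq_revIsWs x (h x hx).1 (h x hx).2.1 (h x hx).2.2)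
  rw [h1]
  congr 1
  apply dropWhile_congr'
  intro x hx
  have hx' : x ∈ p := (List.dropWhile_sublist revIsWs).subset (List.mem_reverse.mp hx)
  exact isspace_eq_revIsWs x (h x hx').1 (h x hx').2.1 (h x hx').2.2

-- the mid-line fold, once the line has started (st.k > 0)
lemma foldl_revChar_started (q : List Char) :
    ∀ (st : RevSt), 0 < st.k →
      q.foldl revChar st =
        ⟨st.hd, st.ml, st.en, st.cnt, st.buf ++ q.take (4 - st.k), st.k + q.length,
         if q.rdropWhile revIsWs = [] then st.slen
         else st.k + (q.rdropWhile revIsWs).length⟩ := by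
  induction q with
  | nil =>
      intro st hk
      simp [List.rdropWhile]
  | cons c q ih =>
      intro st hk
      obtain ⟨hd, ml, en, cnt, buf, k, slen⟩ := st
      simp only at hk
      have hstep : revChar ⟨hd, ml, en, cnt, buf, k, slen⟩ c =
          ⟨hd, ml, en, cnt, if k < 4 then buf ++ [c] else buf, k + 1,
           if !(revIsWs c) then k + 1 else slen⟩ := by
        simp [revChar, hk]
      rw [List.foldl_cons, hstep, ih _ (by simp)]
      simp only [RevSt.mk.injEq, true_and]
      refine ⟨?_, by simp; omega, ?_⟩
      · by_cases h4 : k < 4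
        · have h5 : 4 - k = (4 - (k + 1)) + 1 := by omega
          simp [h4, h5, List.take_succ_cons]
        · have h1 : 4 - k = 0 := by omega
          have h2 : 4 - (k + 1) = 0 := by omega
          simp [h4, h1, h2]
      · by_cases hw : revIsWs c
        · by_cases hq : q.rdropWhile revIsWs = []
          · rw [rdropWhile_cons_all _ _ _ hq hw]
            simp [hq, hw]
          · rw [rdropWhile_cons_ne _ _ _ hq]
            simp [hq, hw]
            omega
        · by_cases hq : q.rdropWhile revIsWs = []
          · rw [rdropWhile_cons_nil _ _ _ hq (by simpa using hw)]
            simp [hq, hw]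
          · rw [rdropWhile_cons_ne _ _ _ hq]
            simp [hq, hw]
            omega

def midSt (h m e : Bool) (n : Nat) (p : List Char) : RevSt :=
  p.foldl revChar ⟨h, m, e, n, [], 0, 0⟩

lemma midSt_char (h m e : Bool) (n : Nat) (p : List Char) :
    midSt h m e n p =
      ⟨h, m, e, n, (p.dropWhile revIsWs).take 4, (p.dropWhile revIsWs).length,
        ((p.dropWhile revIsWs).rdropWhile revIsWs).length⟩ := by
  induction p with
  | nil => simp [midSt, List.rdropWhile]
  | cons c p ih =>
      by_cases hw : revIsWs c
      · have hskip : revChar ⟨h, m, e, n, [], 0, 0⟩ c = ⟨h, m, e, n, [], 0, 0⟩ := by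
          simp [revChar, hw]
        rw [midSt, List.foldl_cons, hskip]
        rw [List.dropWhile_cons_of_pos (by simpa using hw)]
        exact ih
      · have hstart : revChar ⟨h, m, e, n, [], 0, 0⟩ c = ⟨h, m, e, n, [c], 1, 1⟩ := by
          simp [revChar, hw]
        rw [midSt, List.foldl_cons, hstart, foldl_revChar_started _ _ (by simp)]
        rw [List.dropWhile_cons_of_neg (by simpa using hw)]
        simp only [RevSt.mk.injEq, true_and]
        refine ⟨by simp [List.take_succ_cons], by simp; omega, ?_⟩
        by_cases hq : p.rdropWhile revIsWs = []
        · rw [rdropWhile_cons_nil _ c p hq (by simpa using hw)]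
          simp [hq]
        · rw [rdropWhile_cons_ne _ c p hq]
          simp [hq]
          omega

lemma flush_midSt (h m e : Bool) (n : Nat) (p : List Char) :
    revFlush (midSt h m e n p) =
      if wstrip p = [] then ⟨h, m, e, n, [], 0, 0⟩
      else ⟨h || (decide (n < 120) && (wstrip p == ['H','E','A','D'])),
            m || (decide (n < 120) && (wstrip p == ['M','O','D','L'])),
            e || decide (['E','N','D',':'] <+: wstrip p),
            n + 1, [], 0, 0⟩ := by
  rw [midSt_char]
  by_cases hlp : p.dropWhile revIsWs = []
  · have hws : wstrip p = [] := by simp [wstrip, hlp, List.rdropWhile]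
    rw [if_pos hws]
    simp [revFlush, hlp]
  · have hwse : wstrip p = (p.dropWhile revIsWs).rdropWhile revIsWs := rfl
    set lp := p.dropWhile revIsWs with hlpd
    set s := lp.rdropWhile revIsWs with hsd
    have hhead : revIsWs (lp.head hlp) = false := List.head_dropWhile_not revIsWs hlp
    have hs : s ≠ [] := by
      intro h0
      rw [hsd, List.rdropWhile_eq_nil_iff] at h0
      rw [h0 (lp.head hlp) (List.head_mem hlp)] at hhead
      exact absurd hhead (by simp)
    rw [hwse, if_neg hs]
    have hpre : s = lp.take s.length := List.prefix_iff_eq_take.mp (List.rdropWhile_prefix _ _)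
    have keyEq : ∀ t : List Char, t.length = 4 →
        ((s.length == 4) && (lp.take 4 == t)) = (s == t) := by
      intro t ht
      by_cases h4 : s.length = 4
      · have h5 : s = lp.take 4 := by rw [← h4]; exact hpre
        rw [← h5, h4]
        simp
      · have h5 : s ≠ t := fun he => h4 (by rw [he, ht])
        rw [Bool.eq_iff_iff]
        simp [h4, h5]
    have keyPre : ((decide (4 ≤ s.length)) && (lp.take 4 == ['E','N','D',':'])) =
        decide (['E','N','D',':'] <+: s) := by
      by_cases hp : ['E','N','D',':'] <+: s
      · have h4 : 4 ≤ s.length := by simpa using hp.length_le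
        have ht4 : s.take 4 = ['E','N','D',':'] := by
          have h6 := List.prefix_iff_eq_take.mp hp
          simpa using h6.symm
        have hlp4 : lp.take 4 = s.take 4 := by
          rw [hpre, List.take_take]
          congr 1
          omega
        simp [hp, hlp4, ht4, h4]
      · rw [decide_eq_false hp]
        by_cases h4 : 4 ≤ s.length
        · have hlp4 : lp.take 4 = s.take 4 := by
            rw [hpre, List.take_take]
            congr 1
            omega
          have h5 : s.take 4 ≠ ['E','N','D',':'] := fun he => hp (he ▸ List.take_prefix 4 s)
          simp [h4, hlp4, h5]
        · simp [h4]
    have hkpos : 0 < lp.length := List.length_pos_iff.mpr hlp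
    simp only [revFlush, hkpos, if_pos, RevSt.mk.injEq]
    refine ⟨?_, ?_, ?_, trivial, trivial, trivial, trivial⟩
    · rw [keyEq ['H','E','A','D'] rfl]
      by_cases hn : n < 120
      · by_cases hsh : s = ['H','E','A','D'] <;>
          simp [hsh, hn, show n + 1 ≤ 120 by omega]
      · simp [hn, show ¬(n + 1 ≤ 120) by omega]
    · rw [keyEq ['H','E','A','D'] rfl, keyEq ['M','O','D','L'] rfl]
      by_cases hn : n < 120
      · by_cases hsh : s = ['H','E','A','D']
        · have hne : s ≠ ['M','O','D','L'] := by rw [hsh]; decide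
          simp [hsh, beq_eq_false_iff_ne.mpr hne, hn, show n + 1 ≤ 120 by omega]
        · by_cases hsm : s = ['M','O','D','L'] <;>
            simp [hsh, hsm, hn, show n + 1 ≤ 120 by omega]
      · simp [hn, show ¬(n + 1 ≤ 120) by omega]
    · rw [keyPre]
      by_cases hp : ['E','N','D',':'] <+: s <;> simp [hp]

-- stripped non-empty lines, and the target final state over them
def stripNE (M : List (List Char)) : List (List Char) :=
  (M.map PySem.Chars.strip).filter (fun l => !(l == []))

def endSt (h m e : Bool) (n : Nat) (L : List (List Char)) : RevSt :=
  ⟨h || decide (['H','E','A','D'] ∈ L.take (120 - n)),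
   m || decide (['M','O','D','L'] ∈ L.take (120 - n)),
   e || L.any (fun l => decide (['E','N','D',':'] <+: l)),
   n + L.length, [], 0, 0⟩

lemma stripNE_cons (p : List Char) (M : List (List Char)) :
    stripNE (p :: M) =
      if PySem.Chars.strip p = [] then stripNE M else PySem.Chars.strip p :: stripNE M := by
  by_cases hp : PySem.Chars.strip p = [] <;> simp [stripNE, hp]

lemma endSt_cons (h m e : Bool) (n : Nat) (p : List Char) (M : List (List Char)) :
    endSt h m e n (stripNE ([p] ++ M)) =
      if PySem.Chars.strip p = [] then endSt h m e n (stripNE M)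
      else endSt (h || (decide (n < 120) && (PySem.Chars.strip p == ['H','E','A','D'])))
                 (m || (decide (n < 120) && (PySem.Chars.strip p == ['M','O','D','L'])))
                 (e || decide (['E','N','D',':'] <+: PySem.Chars.strip p))
                 (n + 1) (stripNE M) := by
  rw [List.singleton_append, stripNE_cons]
  by_cases hp : PySem.Chars.strip p = []
  · rw [if_pos hp, if_pos hp]
  · rw [if_neg hp, if_neg hp]
    unfold endSt
    simp only [RevSt.mk.injEq]
    set s := PySem.Chars.strip p
    set T := stripNE M
    by_cases hn : n < 120
    · have h1 : 120 - n = (120 - (n + 1)) + 1 := by omega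
      rw [h1, List.take_succ_cons]
      refine ⟨?_, ?_, ?_, by simp; omega⟩
      · by_cases hsh : s = ['H','E','A','D']
        · simp [hsh, hn, List.mem_cons, Bool.or_assoc]
        · simp [beq_eq_false_iff_ne.mpr hsh,
            (show ¬(['H','E','A','D'] = s) from fun hh => hsh hh.symm), hn, List.mem_cons]
      · by_cases hsm : s = ['M','O','D','L']
        · simp [hsm, hn, List.mem_cons, Bool.or_assoc]
        · simp [beq_eq_false_iff_ne.mpr hsm,
            (show ¬(['M','O','D','L'] = s) from fun hh => hsm hh.symm), hn, List.mem_cons]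
      · simp [Bool.or_assoc]
    · have h1 : 120 - n = 0 := by omega
      have h2 : 120 - (n + 1) = 0 := by omega
      rw [h1, h2]
      refine ⟨?_, ?_, ?_, by simp; omega⟩
      · simp [hn]
      · simp [hn]
      · simp [Bool.or_assoc]

-- revRun unfold lemmas
lemma revRun_nil (st : RevSt) : revRun st [] = revFlush st := by rw [revRun.eq_def]

lemma revRun_cons (st : RevSt) (c : Char) (rest : List Char) :
    revRun st (c :: rest) =
      if c == '\n' then revRun (revFlush st) rest
      else if c == '\r' then
        revRun (revFlush st) (if rest.head? == some '\n' then rest.tail else rest)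
      else revRun (revChar st c) rest := by
  rw [revRun.eq_def]

-- flush of a finished line, phrased with Python's strip
lemma flush_line (h m e : Bool) (n : Nat) (p : List Char)
    (hp : ∀ c ∈ p, pvDomChar c = true ∧ c ≠ '\n' ∧ c ≠ '\r') :
    revFlush (midSt h m e n p) =
      if PySem.Chars.strip p = [] then midSt h m e n []
      else midSt (h || (decide (n < 120) && (PySem.Chars.strip p == ['H','E','A','D'])))
                 (m || (decide (n < 120) && (PySem.Chars.strip p == ['M','O','D','L'])))
                 (e || decide (['E','N','D',':'] <+: PySem.Chars.strip p)) (n + 1) [] := by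
  rw [flush_midSt, ← strip_eq_wstrip p hp]
  split <;> rfl

-- end of input: one last (possibly empty) line
lemma rev_base (p : List Char)
    (hp : ∀ c ∈ p, pvDomChar c = true ∧ c ≠ '\n' ∧ c ≠ '\r') (h m e : Bool) (n : Nat) :
    revRun (midSt h m e n p) [] =
      endSt h m e n (stripNE (PySem.Chars.splitlines.go pvB [] p.reverse [])) := by
  rw [revRun_nil, flush_line h m e n p hp, go_nil]
  by_cases hpn : p = []
  · subst hpn
    simp [PySem.Chars.strip, PySem.Chars.lstrip, PySem.Chars.rstrip, stripNE, endSt, midSt]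
  · rw [if_neg (show ¬(p.reverse.isEmpty = true) by simp [hpn])]
    have hone : ((p.reverse.reverse : List Char) :: ([] : List (List Char))).reverse = [p] := by
      simp
    rw [hone]
    have hc := endSt_cons h m e n p []
    rw [List.singleton_append] at hc
    rw [hc]
    by_cases hsp : PySem.Chars.strip p = []
    · rw [if_pos hsp, if_pos hsp]
      simp [stripNE, endSt, midSt]
    · rw [if_neg hsp, if_neg hsp]
      simp [stripNE, endSt, midSt]

-- the main simulation, by strong induction on the character list
lemma rev_main :
    ∀ N cs, cs.length ≤ N → (∀ c ∈ cs, pvDomChar c = true) →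
      ∀ p, (∀ c ∈ p, pvDomChar c = true ∧ c ≠ '\n' ∧ c ≠ '\r') →
        ∀ h m e n,
          revRun (midSt h m e n p) cs =
            endSt h m e n (stripNE (PySem.Chars.splitlines.go pvB cs p.reverse [])) := by
  intro N
  induction N with
  | zero =>
      intro cs hcs hdom p hp h m e n
      have hnil : cs = [] := by cases cs with | nil => rfl | cons a b => simp at hcs
      subst hnil
      exact rev_base p hp h m e n
  | succ N ih =>
      intro cs hcs hdom p hp h m e n
      cases cs with
      | nil => exact rev_base p hp h m e n
      | cons c rest =>
        have hdc : pvDomChar c = true := hdom c (by simp)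
        have hdrest : ∀ x ∈ rest, pvDomChar x = true := fun x hx => hdom x (by simp [hx])
        have hlen : rest.length ≤ N := by simp at hcs; omega
        rw [revRun_cons]
        by_cases hcn : c = '\n'
        · subst hcn
          rw [if_pos (by decide)]
          rw [go_step pvB '\n' rest p.reverse [] (Or.inl (by decide)), if_pos (by decide)]
          rw [go_acc pvB rest.length rest le_rfl [] [p.reverse.reverse]]
          simp only [List.reverse_cons, List.reverse_nil, List.nil_append, List.reverse_reverse]
          rw [flush_line h m e n p hp, endSt_cons]
          by_cases hsp : PySem.Chars.strip p = []
          · rw [if_pos hsp, if_pos hsp]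
            exact ih rest hlen hdrest [] (by simp) h m e n
          · rw [if_neg hsp, if_neg hsp]
            exact ih rest hlen hdrest [] (by simp) _ _ _ _
        · by_cases hcr : c = '\r'
          · subst hcr
            rw [if_neg (by decide), if_pos (by decide)]
            cases rest with
            | nil =>
              rw [if_neg (by decide)]
              rw [go_step pvB '\r' [] p.reverse [] (Or.inr (by simp)), if_pos (by decide)]
              rw [go_acc pvB 0 [] le_rfl [] [p.reverse.reverse]]
              simp only [List.reverse_cons, List.reverse_nil, List.nil_append,
                List.reverse_reverse]
              rw [flush_line h m e n p hp, endSt_cons]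
              by_cases hsp : PySem.Chars.strip p = []
              · rw [if_pos hsp, if_pos hsp]
                exact ih [] (by simp) (by simp) [] (by simp) h m e n
              · rw [if_neg hsp, if_neg hsp]
                exact ih [] (by simp) (by simp) [] (by simp) _ _ _ _
            | cons d r2 =>
              by_cases hdn : d = '\n'
              · subst hdn
                rw [if_pos (by simp)]
                simp only [List.tail_cons]
                rw [go_crlf]
                rw [go_acc pvB r2.length r2 le_rfl [] [p.reverse.reverse]]
                simp only [List.reverse_cons, List.reverse_nil, List.nil_append,
                  List.reverse_reverse]
                have hlen2 : r2.length ≤ N := by simp at hcs; omega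
                have hdr2 : ∀ x ∈ r2, pvDomChar x = true := fun x hx => hdrest x (by simp [hx])
                rw [flush_line h m e n p hp, endSt_cons]
                by_cases hsp : PySem.Chars.strip p = []
                · rw [if_pos hsp, if_pos hsp]
                  exact ih r2 hlen2 hdr2 [] (by simp) h m e n
                · rw [if_neg hsp, if_neg hsp]
                  exact ih r2 hlen2 hdr2 [] (by simp) _ _ _ _
              · rw [if_neg (by simp [hdn])]
                rw [go_step pvB '\r' (d::r2) p.reverse [] (Or.inr (by simp [hdn])),
                  if_pos (by decide)]
                rw [go_acc pvB (d::r2).length (d::r2) le_rfl [] [p.reverse.reverse]]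
                simp only [List.reverse_cons, List.reverse_nil, List.nil_append,
                  List.reverse_reverse]
                rw [flush_line h m e n p hp, endSt_cons]
                by_cases hsp : PySem.Chars.strip p = []
                · rw [if_pos hsp, if_pos hsp]
                  exact ih (d::r2) hlen hdrest [] (by simp) h m e n
                · rw [if_neg hsp, if_neg hsp]
                  exact ih (d::r2) hlen hdrest [] (by simp) _ _ _ _
          · rw [if_neg (by simp [hcn]), if_neg (by simp [hcr])]
            have hpvb : pvB c = false := by rw [pvB_eq c hdc]; simp [hcn, hcr]
            rw [go_step pvB c rest p.reverse [] (Or.inl hcr), if_neg (by simp [hpvb])]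
            have hfold : revChar (midSt h m e n p) c = midSt h m e n (p ++ [c]) := by
              simp [midSt, List.foldl_append]
            rw [hfold]
            have hrev : (c :: p.reverse) = (p ++ [c]).reverse := by simp
            rw [hrev]
            refine ih rest hlen hdrest (p ++ [c]) ?_ h m e n
            intro x hx
            rcases List.mem_append.mp hx with h' | h'
            · exact hp x h'
            · simp at h'
              subst h'
              exact ⟨hdc, hcn, hcr⟩

-- ===== A-side bridge to the char level =====
lemma ofList_eq_empty_iff (l : List Char) : (String.ofList l = "") ↔ l = [] := by
  constructor
  · intro h0
    have h1 := congrArg String.toList h0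
    simpa using h1
  · intro h0
    subst h0
    rfl

lemma mem_map_ofList_iff (t : List Char) (L' : List (List Char)) :
    (String.ofList t ∈ L'.map String.ofList) ↔ t ∈ L' := by
  constructor
  · intro hx
    rcases List.mem_map.mp hx with ⟨a, ha, hae⟩
    have h1 := congrArg String.toList hae
    simp only [String.toList_ofList] at h1
    rwa [← h1]
  · intro hx
    exact List.mem_map_of_mem hx

lemma startswith_ofList (l : List Char) :
    PySem.Str.startswith (String.ofList l) "END:" = decide (['E','N','D',':'] <+: l) := by
  have h1 : PySem.Str.startswith (String.ofList l) "END:" =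
      PySem.Chars.startswith l ['E','N','D',':'] := by
    simp [PySem.Str.startswith, String.toList_ofList,
      (show "END:".toList = ['E','N','D',':'] by decide)]
  rw [h1]
  by_cases hh : ['E','N','D',':'] <+: l
  · simp [PySem.Chars.startswith_iff, hh]
  · rw [decide_eq_false hh, Bool.eq_false_iff]
    intro hc
    rw [PySem.Chars.startswith_iff] at hc
    exact hh hc

lemma A_formula (text : String) :
    looks_like_rev_text_py text =
      (decide (['H','E','A','D'] ∈ (stripNE (PySem.Chars.splitlines text.toList)).take 120) &&
       decide (['M','O','D','L'] ∈ (stripNE (PySem.Chars.splitlines text.toList)).take 120) &&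
       (stripNE (PySem.Chars.splitlines text.toList)).any
         (fun l => decide (['E','N','D',':'] <+: l))) := by
  unfold looks_like_rev_text_py
  set M := PySem.Chars.splitlines text.toList with hM
  have hmapped : ((PySem.Str.splitlines text).map PySem.Str.strip).filter (fun l => !(l == "")) =
      (stripNE M).map String.ofList := by
    unfold stripNE
    rw [PySem.Str.splitlines, ← hM, List.map_map]
    have hfun : (PySem.Str.strip ∘ String.ofList) =
        (fun l => String.ofList (PySem.Chars.strip l)) := by
      funext l
      simp [PySem.Str.strip, String.toList_ofList]
    rw [hfun, List.filter_map, List.filter_map, List.map_map]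
    congr 1
    apply List.filter_congr
    intro l _
    by_cases hh : PySem.Chars.strip l = []
    · simp [hh, Function.comp, ofList_eq_empty_iff]
    · have hne : String.ofList (PySem.Chars.strip l) ≠ "" :=
        fun hx => hh ((ofList_eq_empty_iff _).mp hx)
      simp [hh, Function.comp, hne, List.isEmpty_iff, beq_eq_false_iff_ne.mpr hne]
  rw [hmapped]
  by_cases hL : stripNE M = []
  · rw [hL]
    simp
  · rw [if_neg (by simp [List.isEmpty_iff, hL])]
    have hslice : PySem.List.slice ((stripNE M).map String.ofList) none (some 120) =
        ((stripNE M).map String.ofList).take 120 := by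
      simpa using PySem.List.slice_to_natCast ((stripNE M).map String.ofList) 120
    simp only [hslice, ← List.map_take]
    have hH : ("HEAD" ∈ PySem.Set.ofList (((stripNE M).take 120).map String.ofList)) ↔
        ['H','E','A','D'] ∈ (stripNE M).take 120 := by
      rw [PySem.Set.mem_ofList, (show ("HEAD" : String) = String.ofList ['H','E','A','D'] by decide)]
      exact mem_map_ofList_iff _ _
    have hMo : ("MODL" ∈ PySem.Set.ofList (((stripNE M).take 120).map String.ofList)) ↔
        ['M','O','D','L'] ∈ (stripNE M).take 120 := by
      rw [PySem.Set.mem_ofList, (show ("MODL" : String) = String.ofList ['M','O','D','L'] by decide)]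
      exact mem_map_ofList_iff _ _
    have hany : ((stripNE M).map String.ofList).any (fun l => PySem.Str.startswith l "END:") =
        (stripNE M).any (fun l => decide (['E','N','D',':'] <+: l)) := by
      rw [List.any_map]
      exact List.any_congr rfl (fun l => startswith_ofList l)
    have hHb : PySem.Set.contains
        (PySem.Set.ofList (((stripNE M).take 120).map String.ofList)) "HEAD" =
        decide (['H','E','A','D'] ∈ (stripNE M).take 120) := by
      by_cases h1 : ['H','E','A','D'] ∈ (stripNE M).take 120
      · have hm := hH.mpr h1
        simp [PySem.Set.contains, PySem.Set.mem_ofList, ← List.map_take, hH, hm, h1]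
      · have hm : "HEAD" ∉ PySem.Set.ofList (((stripNE M).take 120).map String.ofList) :=
          fun hx => h1 (hH.mp hx)
        simp [PySem.Set.contains, PySem.Set.mem_ofList, ← List.map_take, hH, hm, h1]
    have hMb : PySem.Set.contains
        (PySem.Set.ofList (((stripNE M).take 120).map String.ofList)) "MODL" =
        decide (['M','O','D','L'] ∈ (stripNE M).take 120) := by
      by_cases h2 : ['M','O','D','L'] ∈ (stripNE M).take 120
      · have hm := hMo.mpr h2
        simp [PySem.Set.contains, PySem.Set.mem_ofList, ← List.map_take, hMo, hm, h2]
      · have hm : "MODL" ∉ PySem.Set.ofList (((stripNE M).take 120).map String.ofList) :=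
          fun hx => h2 (hMo.mp hx)
        simp [PySem.Set.contains, PySem.Set.mem_ofList, ← List.map_take, hMo, hm, h2]
    rw [hHb, hMb, hany]

-- ===== VERDICT (by name: the statement is the Claim_ definition above) =====
theorem looks_like_rev_text_py_spec : Claim_equal_looks_like_rev_text_py := by
  intro text hdom
  unfold Spec_looks_like_rev_text_py
  have hdomc : ∀ c ∈ text.toList, pvDomChar c = true := by
    unfold Dom_looks_like_rev_text_py pvDomStr at hdom
    simpa [List.all_eq_true] using hdom
  have hB := rev_main text.toList.length text.toList le_rfl hdomc [] (by simp)
    false false false 0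
  simp only [List.reverse_nil] at hB
  have hinit : midSt false false false 0 [] = (⟨false, false, false, 0, [], 0, 0⟩ : RevSt) := rfl
  rw [hinit] at hB
  rw [A_formula]
  unfold looks_like_rev_text_py_alt
  rw [hB, ← splitlines_eq]
  simp [endSt]
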